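-- pv_equiv track=rewrite | github.com/ligb1023561601/DecisionTree | trees.py | leaf_node_class
-- ===== SOURCE A (Python) =====
-- import operator
--
-- def leaf_node_class(node_data_set):
--     """
--     确定叶结点的分类类别，返回叶结点中样本数最多的类别
--     :param node_data_set:叶结点数据集
--     :return: 返回的类别
--     """
--     node_labels = {}
--     node_size = len(node_data_set)
--
--     # 逐行统计各类别的样本数
--     for node_sample in range(node_size):
--         node_label = node_data_set[node_sample][-1]
--         if node_label not in node_labels.keys():
--             node_labels[node_label] = 1
--         else:
--             node_labels[node_label] += 1
--
--     # 返回的是一个以元组为元素的列表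
--     sorted_labels_count = sorted(node_labels.items(), key=operator.itemgetter(1), reverse=True)
--     return sorted_labels_count[0][0]
-- ===== SOURCE B (Python) =====
-- def leaf_node_class(node_data_set):
--     counts = {}
--     for row in node_data_set:
--         label = row[-1]
--         counts[label] = counts.get(label, 0) + 1
--     return max(counts, key=counts.get)
-- ===== Notes on version B (the rewrite author's own statement) =====
-- stated objective: simpler
-- what changed: Replaces the index loop with a membership branch and the descending sort of the count items by direct row iteration with get-default counting and a single argmax pass (max with key) over the count dict, keeping A's first-inserted tie-breaking.
import Mathlib
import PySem

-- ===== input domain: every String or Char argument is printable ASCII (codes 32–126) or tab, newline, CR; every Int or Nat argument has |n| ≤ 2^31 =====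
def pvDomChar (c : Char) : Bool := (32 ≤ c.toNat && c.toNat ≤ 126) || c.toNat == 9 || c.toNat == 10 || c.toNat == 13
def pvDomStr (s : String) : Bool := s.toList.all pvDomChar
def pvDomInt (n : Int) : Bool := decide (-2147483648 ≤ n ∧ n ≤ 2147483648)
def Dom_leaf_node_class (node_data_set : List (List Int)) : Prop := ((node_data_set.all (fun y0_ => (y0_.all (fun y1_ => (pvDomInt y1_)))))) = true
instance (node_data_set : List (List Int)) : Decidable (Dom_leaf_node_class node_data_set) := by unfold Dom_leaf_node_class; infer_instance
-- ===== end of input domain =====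

-- B replaces A's index loop + membership-branch counting and descending sort of the count items
-- by direct row iteration with get-default counting and a single argmax pass (simpler, same result).


-- ===== PORT A =====
def leaf_node_class (node_data_set : List (List Int)) : Int :=
  let node_labels :=
    (PySem.List.pyRange 0 (PySem.List.len node_data_set) 1).foldl
      (fun d i =>
        let node_label := PySem.List.pyGetD (PySem.List.pyGetD node_data_set i []) (-1) 0
        if d.contains node_label = false then d.insert node_label 1
        else d.insert node_label (d.getD node_label 0 + 1))
      (PySem.Dict.empty : PySem.Dict Int Int)
  let sorted_labels_count := PySem.List.sorted node_labels.items (fun p => p.2) true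
  (PySem.List.pyGetD sorted_labels_count 0 (0, 0)).1

-- ===== PORT B =====
def leaf_node_class_alt (node_data_set : List (List Int)) : Int :=
  let counts := node_data_set.foldl
    (fun d row =>
      let label := PySem.List.pyGetD row (-1) 0
      d.insert label (d.getD label 0 + 1))
    (PySem.Dict.empty : PySem.Dict Int Int)
  match PySem.List.max? counts.keys (fun k => counts.getD k 0) with
  | some k => k
  | none => 0

-- ===== PRECONDITION & SPEC =====
-- Pre_ excludes exactly the inputs on which Python A raises IndexError: the empty dataset
-- (sorted_labels_count[0] on an empty list) and datasets containing an empty row (row[-1]).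
def Pre_leaf_node_class (node_data_set : List (List Int)) : Prop :=
  node_data_set ≠ [] ∧ ∀ row ∈ node_data_set, row ≠ []
instance (node_data_set : List (List Int)) : Decidable (Pre_leaf_node_class node_data_set) := by
  unfold Pre_leaf_node_class; infer_instance
def pvWitness_leaf_node_class : List (List Int) := [[1, 0], [2, 0], [3, 1]]
def Spec_leaf_node_class (node_data_set : List (List Int)) (out : Int) : Prop := out = leaf_node_class_alt node_data_set
instance (node_data_set : List (List Int)) (out : Int) : Decidable (Spec_leaf_node_class node_data_set out) := by unfold Spec_leaf_node_class; infer_instance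

-- ===== CLAIM (what is proved, stated in full; the proofs are below) =====
def Claim_equal_leaf_node_class : Prop := ∀ (node_data_set : List (List Int)), Dom_leaf_node_class node_data_set → Pre_leaf_node_class node_data_set → Spec_leaf_node_class node_data_set (leaf_node_class node_data_set)

-- ===== LEMMAS AND PROOFS =====
-- head of a reverse-stable-sort insertion step depends only on the head of the accumulator
theorem head?_insertBy_rev {α : Type} (key : α → Int) (x : α) (acc : List α) :
    (PySem.List.insertBy (fun a b => decide (key b < key a)) x acc).head? =
      some (match acc.head? with
            | none => x
            | some m => if key m < key x then x else m) := by
  cases acc with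
  | nil => simp [PySem.List.insertBy]
  | cons y ys =>
    simp only [PySem.List.insertBy, List.head?]
    by_cases h : key y < key x <;> simp [h]

-- the head of the insertion-sort fold is the running first-argmax
theorem head?_foldl_insertBy_rev {α : Type} (key : α → Int) (xs : List α) (acc : List α) :
    (xs.foldl (fun a x => PySem.List.insertBy (fun a b => decide (key b < key a)) x a) acc).head? =
      xs.foldl (fun o x =>
          match o with
          | none => some x
          | some m => if key m < key x then some x else some m) acc.head? := by
  induction xs generalizing acc with
  | nil => rfl
  | cons x xs ih =>
    simp only [List.foldl_cons]
    rw [ih, head?_insertBy_rev]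
    congr 1
    cases acc with
    | nil => rfl
    | cons y ys => by_cases h : key y < key x <;> simp [h]

-- head of sorted(xs, key, reverse=True) is max(xs, key): both pick the FIRST element with maximal key
theorem head?_sorted_rev_eq_max? {α : Type} (xs : List α) (key : α → Int) :
    (PySem.List.sorted xs key true).head? = PySem.List.max? xs key := by
  simp only [PySem.List.sorted, PySem.List.max?, if_true]
  rw [head?_foldl_insertBy_rev]
  rfl

-- max? over a mapped list
theorem max?_map {α β : Type} (g : α → β) (xs : List α) (key : β → Int) :
    PySem.List.max? (xs.map g) key = (PySem.List.max? xs (fun a => key (g a))).map g := by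
  simp only [PySem.List.max?, List.foldl_map]
  have h : ∀ (o : Option α),
      xs.foldl (fun (acc : Option β) a =>
          match acc with
          | none => some (g a)
          | some m => if key m < key (g a) then some (g a) else some m) (o.map g) =
        (xs.foldl (fun (acc : Option α) a =>
          match acc with
          | none => some a
          | some m => if key (g m) < key (g a) then some a else some m) o).map g := by
    intro o
    induction xs generalizing o with
    | nil => rfl
    | cons a t ih =>
      simp only [List.foldl_cons]
      rw [← ih]
      congr 1
      cases o with
      | none => rfl
      | some m => by_cases h : key (g m) < key (g a) <;> simp [h]
  exact h none

theorem leaf_node_class_eq_alt (node_data_set : List (List Int))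
    (hne : node_data_set ≠ []) :
    leaf_node_class node_data_set = leaf_node_class_alt node_data_set := by
  unfold leaf_node_class leaf_node_class_alt
  simp only []
  rw [show (PySem.List.pyRange 0 (PySem.List.len node_data_set) 1).foldl
      (fun d i =>
        if d.contains (PySem.List.pyGetD (PySem.List.pyGetD node_data_set i []) (-1) 0) = false then
          d.insert (PySem.List.pyGetD (PySem.List.pyGetD node_data_set i []) (-1) 0) 1
        else d.insert (PySem.List.pyGetD (PySem.List.pyGetD node_data_set i []) (-1) 0)
          (d.getD (PySem.List.pyGetD (PySem.List.pyGetD node_data_set i []) (-1) 0) 0 + 1))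
      (PySem.Dict.empty : PySem.Dict Int Int) =
    node_data_set.foldl
      (fun d row =>
        if d.contains (PySem.List.pyGetD row (-1) 0) = false then d.insert (PySem.List.pyGetD row (-1) 0) 1
        else d.insert (PySem.List.pyGetD row (-1) 0) (d.getD (PySem.List.pyGetD row (-1) 0) 0 + 1))
      PySem.Dict.empty from
    PySem.List.foldl_pyRange_zero_pyGetD (xs := node_data_set) (d := [])
      (f := fun (d : PySem.Dict Int Int) (row : List Int) =>
        if d.contains (PySem.List.pyGetD row (-1) 0) = false then d.insert (PySem.List.pyGetD row (-1) 0) 1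
        else d.insert (PySem.List.pyGetD row (-1) 0) (d.getD (PySem.List.pyGetD row (-1) 0) 0 + 1))
      (init := PySem.Dict.empty)]
  have hbody : node_data_set.foldl
      (fun d row =>
        if d.contains (PySem.List.pyGetD row (-1) 0) = false then d.insert (PySem.List.pyGetD row (-1) 0) 1
        else d.insert (PySem.List.pyGetD row (-1) 0) (d.getD (PySem.List.pyGetD row (-1) 0) 0 + 1))
      (PySem.Dict.empty : PySem.Dict Int Int) =
      node_data_set.foldl
      (fun d row =>
        d.insert (PySem.List.pyGetD row (-1) 0) (d.getD (PySem.List.pyGetD row (-1) 0) 0 + 1))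
      (PySem.Dict.empty : PySem.Dict Int Int) := by
    apply PySem.List.foldl_congr_mem
    intro d row _
    by_cases h : d.contains (PySem.List.pyGetD row (-1) 0) = false
    · rw [if_pos h, PySem.Dict.getD_of_not_contains (h := h)]; norm_num
    · rw [if_neg h]
  rw [hbody]
  set labels := node_data_set.map (fun row => PySem.List.pyGetD row (-1) 0) with hl
  have hcnt : node_data_set.foldl
      (fun d row =>
        d.insert (PySem.List.pyGetD row (-1) 0) (d.getD (PySem.List.pyGetD row (-1) 0) 0 + 1))
      (PySem.Dict.empty : PySem.Dict Int Int) = PySem.Dict.counter labels := by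
    rw [← PySem.Dict.foldl_insert_getD_add_one_eq_counter, hl, List.foldl_map]
  rw [hcnt]
  rw [PySem.Dict.items_counter, PySem.Dict.keys_counter]
  have hkey : (fun k => (PySem.Dict.counter labels).getD k 0) = fun k => (labels.count k : Int) := by
    funext k; exact PySem.Dict.getD_counter labels k
  rw [hkey]
  have hS : PySem.Set.ofList labels ≠ [] := by
    cases hne' : node_data_set with
    | nil => exact absurd hne' hne
    | cons r t =>
      intro h
      have : PySem.List.pyGetD r (-1) 0 ∈ PySem.Set.ofList labels := by
        rw [PySem.Set.mem_ofList]; simp [hl, hne']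
      rw [h] at this; exact absurd this List.not_mem_nil
  have hmax := head?_sorted_rev_eq_max? ((PySem.Set.ofList labels).map
      (fun k => (k, (labels.count k : Int)))) (fun p => p.2)
  rw [max?_map (fun k => (k, (labels.count k : Int))) _ (fun p => p.2)] at hmax
  cases hm : PySem.List.max? (PySem.Set.ofList labels) (fun a => (labels.count a : Int)) with
  | none =>
    rw [PySem.List.max?_eq_none_iff] at hm
    exact absurd hm hS
  | some k =>
    rw [hm] at hmax
    simp only [Option.map_some] at hmax
    obtain ⟨t, ht⟩ := List.head?_eq_some_iff.mp hmax
    rw [ht]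
    simp [PySem.List.pyGetD]

-- ===== VERDICT (by name: the statement is the Claim_ definition above) =====
theorem leaf_node_class_spec : Claim_equal_leaf_node_class := by
  intro node_data_set _ hpre
  unfold Spec_leaf_node_class
  exact leaf_node_class_eq_alt node_data_set hpre.1
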